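-- pv_equiv track=rewrite | github.com/manojnayakkuna/leetcode_easy | misc_algorithms/zombie_rottenTomato.py | zombieSolutions
-- ===== SOURCE A (Python) =====
-- def zombieSolutions(grid):
--     if len(grid) <= 0:
--         return -1
--
--     m = len(grid)
--     n = len(grid[0]) if grid else 0
--
--     queue = [[i,j] for i in range(m) for j in range(n) if grid[i][j] == 1]
--     dir = [[1,0],[-1,0],[0,1],[0,-1]]
--     count = 0
--
--     while len(queue) > 0:
--         new_queue = []
--         for q in queue:
--             i = q[0]
--             j = q[1]
--             if grid[i][j] == 1:
--                 for d in dir: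
--                     ni, nj = i+d[0], j+d[1]
--                     if 0 <= ni < m and 0 <= nj < n and grid[ni][nj] == 0:
--                         grid[ni][nj] = 1
--                         new_queue.append([ni,nj])
--         count = count + 1
--         queue = new_queue
--
--     return count
-- ===== SOURCE B (Python) =====
-- def zombieSolutions(grid):
--     if len(grid) <= 0:
--         return -1
--
--     m = len(grid)
--     n = len(grid[0]) if grid else 0
--
--     zombies = {(i, j) for i in range(m) for j in range(n) if grid[i][j] == 1}
--     empties = [(i, j) for i in range(m) for j in range(n) if grid[i][j] == 0]
--
--     if not zombies:
--         return 0
--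
--     count = 0
--     while True:
--         count += 1
--         infected = [(i, j) for (i, j) in empties
--                     if (i + 1, j) in zombies or (i - 1, j) in zombies
--                     or (i, j + 1) in zombies or (i, j - 1) in zombies]
--         if not infected:
--             return count
--         zombies.update(infected)
--         empties = [p for p in empties if p not in zombies]
-- ===== Notes on version B (the rewrite author's own statement) =====
-- stated objective: alternative
-- what changed: Replaces A's grid-mutating BFS frontier queue by a coordinate-set simulation: B extracts once a set of zombie coordinates and a list of empty coordinates, and each round keeps the empties that have a zombie neighbor (pure membership tests, no bounds checks, no grid writes), bulk-adds them to the set and drops them from the list, counting rounds until none is infected; B never mutates the grid.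
import Mathlib
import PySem

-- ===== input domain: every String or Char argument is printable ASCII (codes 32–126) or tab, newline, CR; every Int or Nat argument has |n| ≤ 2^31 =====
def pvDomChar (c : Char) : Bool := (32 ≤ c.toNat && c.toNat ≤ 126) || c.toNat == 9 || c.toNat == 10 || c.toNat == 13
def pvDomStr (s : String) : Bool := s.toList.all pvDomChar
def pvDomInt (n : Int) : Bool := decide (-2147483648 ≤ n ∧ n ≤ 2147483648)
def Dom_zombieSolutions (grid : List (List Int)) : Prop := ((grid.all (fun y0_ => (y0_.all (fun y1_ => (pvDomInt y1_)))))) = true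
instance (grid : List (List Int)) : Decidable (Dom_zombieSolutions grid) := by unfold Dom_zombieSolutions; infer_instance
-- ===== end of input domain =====

-- B replaces A's grid-mutating frontier-queue BFS by a coordinate-set simulation (a zombie
-- set plus a shrinking list of empty cells, pure membership tests, no grid writes); same
-- return value, but B does not mutate grid in place as the Python A does (the equivalence
-- proved is about the return value). Pre_ excludes exactly the ragged grids (a row shorter
-- than the first row), on which the Python A raises IndexError.


-- ===== PORT A =====
-- A reads/writes grid[i][j] with indices guarded 0 ≤ i < m, 0 ≤ j < n, so getD/toNat are exact
def pvDirs : List (Int × Int) := [(1,0),(-1,0),(0,1),(0,-1)]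
def pvGet (g : List (List Int)) (i j : Int) : Int := (g.getD i.toNat []).getD j.toNat 0
def pvSet (g : List (List Int)) (i j : Int) (v : Int) : List (List Int) :=
  g.modify i.toNat (fun row => row.set j.toNat v)

-- the inner 'for d in dir' loop of A
def pvStepDirs (m n i j : Int) (st : List (List Int) × List (Int × Int)) :
    List (List Int) × List (Int × Int) :=
  pvDirs.foldl (fun st d =>
    let ni := i + d.1
    let nj := j + d.2
    if 0 ≤ ni ∧ ni < m ∧ 0 ≤ nj ∧ nj < n ∧ pvGet st.1 ni nj = 0 then
      (pvSet st.1 ni nj 1, st.2 ++ [(ni, nj)])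
    else st) st

-- one iteration of A's while loop body (grid after mutation, new_queue)
def pvRound (m n : Int) (g : List (List Int)) (queue : List (Int × Int)) :
    List (List Int) × List (Int × Int) :=
  queue.foldl (fun st q => if pvGet st.1 q.1 q.2 = 1 then pvStepDirs m n q.1 q.2 st else st)
    (g, [])

-- A's while loop; fuel is only a totality guard (m*n+1 steps always suffice)
def pvLoopA (m n : Int) : Nat → List (List Int) → List (Int × Int) → Int → Int
  | 0, _, _, count => count
  | fuel+1, g, queue, count =>
    if queue = [] then count
    else
      let st := pvRound m n g queue
      pvLoopA m n fuel st.1 st.2 (count + 1)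

def zombieSolutions (grid : List (List Int)) : Int :=
  if grid.length ≤ 0 then -1
  else
    let m : Int := grid.length
    let n : Int := if grid ≠ [] then ((grid.headD []).length : Int) else 0
    let queue : List (Int × Int) :=
      (List.range grid.length).flatMap (fun (i : Nat) =>
        (List.range n.toNat).filterMap (fun (j : Nat) =>
          if pvGet grid (i : Int) (j : Int) = 1 then some ((i : Int), (j : Int)) else none))
    pvLoopA m n (grid.length * n.toNat + 1) grid queue 0

-- ===== PORT B =====
-- B's only grid reads are the two initial comprehensions, with 0 ≤ i < m, 0 ≤ j < n
def pvCell (g : List (List Int)) (i j : Nat) : Int := (g.getD i []).getD j 0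

-- '(i+1,j) in zombies or … or (i,j-1) in zombies'
def pvNearZ (Z : PySem.Set (Int × Int)) (p : Int × Int) : Bool :=
  PySem.Set.contains Z (p.1 + 1, p.2) || PySem.Set.contains Z (p.1 - 1, p.2) ||
  PySem.Set.contains Z (p.1, p.2 + 1) || PySem.Set.contains Z (p.1, p.2 - 1)

-- B's 'while True' loop over (zombies, empties); fuel is only a totality guard
def pvSpread : Nat → PySem.Set (Int × Int) → List (Int × Int) → Int → Int
  | 0, _, _, count => count
  | fuel+1, Z, E, count =>
    let infected := E.filter (fun p => pvNearZ Z p)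
    if infected = [] then count + 1
    else
      let Z' := PySem.Set.update Z infected
      pvSpread fuel Z' (E.filter (fun p => !(PySem.Set.contains Z' p))) (count + 1)

def zombieSolutions_alt (grid : List (List Int)) : Int :=
  if grid.length ≤ 0 then -1
  else
    let m : Nat := grid.length
    let n : Nat := if grid ≠ [] then (grid.headD []).length else 0
    let zombies : PySem.Set (Int × Int) :=
      PySem.Set.ofList ((List.range m).flatMap (fun i =>
        (List.range n).filterMap (fun j =>
          if pvCell grid i j = 1 then some ((i : Int), (j : Int)) else none)))
    let empties : List (Int × Int) :=
      (List.range m).flatMap (fun i =>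
        (List.range n).filterMap (fun j =>
          if pvCell grid i j = 0 then some ((i : Int), (j : Int)) else none))
    if zombies = [] then 0
    else pvSpread (m * n + 1) zombies empties 0

-- ===== PRECONDITION & SPEC =====
-- Pre_ excludes exactly the inputs where the Python A raises IndexError: a grid with some
-- row shorter than the first row (the initial queue comprehension reads grid[i][j] for all
-- j < len(grid[0])). On all other inputs A returns normally.
def Pre_zombieSolutions (grid : List (List Int)) : Prop :=
  ∀ row ∈ grid, (grid.headD []).length ≤ row.length

instance (grid : List (List Int)) : Decidable (Pre_zombieSolutions grid) := by
  unfold Pre_zombieSolutions; infer_instance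

def pvWitness_zombieSolutions : List (List Int) := [[1, 0], [0, 0]]

def Spec_zombieSolutions (grid : List (List Int)) (out : Int) : Prop := out = zombieSolutions_alt grid
instance (grid : List (List Int)) (out : Int) : Decidable (Spec_zombieSolutions grid out) := by
  unfold Spec_zombieSolutions; infer_instance

-- ===== CLAIM (what is proved, stated in full; the proofs are below) =====
def Claim_equal_zombieSolutions : Prop := ∀ (grid : List (List Int)), Dom_zombieSolutions grid → Pre_zombieSolutions grid → Spec_zombieSolutions grid (zombieSolutions grid)

-- ===== LEMMAS AND PROOFS =====

-- grid shape: m rows, every row at least n wide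
def pvShape (m n : Int) (g : List (List Int)) : Prop :=
  (g.length : Int) = m ∧ ∀ row ∈ g, n ≤ (row.length : Int)

-- in-window position
def pvWin (m n : Int) (p : Int × Int) : Prop := 0 ≤ p.1 ∧ p.1 < m ∧ 0 ≤ p.2 ∧ p.2 < n

-- q spreads to p in one step
def pvAdj (q p : Int × Int) : Prop := ∃ d ∈ pvDirs, p = (q.1 + d.1, q.2 + d.2)

-- the set of cells flipped in one round from grid g
def pvT (m n : Int) (g : List (List Int)) (p : Int × Int) : Prop :=
  pvWin m n p ∧ pvGet g p.1 p.2 = 0 ∧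
    ∃ q, pvWin m n q ∧ pvGet g q.1 q.2 = 1 ∧ pvAdj q p

-- A's loop invariant: queue cells are in-window 1-cells, and every flippable cell has a
-- spreader in the queue
def pvInv (m n : Int) (g : List (List Int)) (Q : List (Int × Int)) : Prop :=
  (∀ q ∈ Q, pvWin m n q ∧ pvGet g q.1 q.2 = 1) ∧
  (∀ p, pvT m n g p → ∃ q ∈ Q, pvAdj q p)

-- B's loop invariant: Z holds exactly the in-window 1-cells of g, E exactly its 0-cells
def pvSB (m n : Int) (g : List (List Int)) (Z : PySem.Set (Int × Int))
    (E : List (Int × Int)) : Prop :=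
  (∀ p, p ∈ Z ↔ pvWin m n p ∧ pvGet g p.1 p.2 = 1) ∧
  (∀ p, p ∈ E ↔ pvWin m n p ∧ pvGet g p.1 p.2 = 0)

-- canonical bulk write: set to 1 every cell whose (Int) indices satisfy P
def pvFlip (g : List (List Int)) (P : Int → Int → Bool) : List (List Int) :=
  g.mapIdx (fun i row => row.mapIdx (fun j v => if P i j then 1 else v))

theorem pvFlip_shape {m n : Int} {g : List (List Int)} (P : Int → Int → Bool)
    (h : pvShape m n g) : pvShape m n (pvFlip g P) := by
  obtain ⟨h1, h2⟩ := h
  refine ⟨by simpa [pvFlip] using h1, ?_⟩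
  intro row hrow
  rw [List.mem_iff_getElem] at hrow
  obtain ⟨k, hk, rfl⟩ := hrow
  have hk' : k < g.length := by simpa [pvFlip] using hk
  simp only [pvFlip, List.getElem_mapIdx, List.length_mapIdx]
  exact h2 _ (List.getElem_mem hk')

theorem pvGet_flip {g : List (List Int)} {P : Int → Int → Bool} {i j : Int}
    (hi : 0 ≤ i) (hi2 : i.toNat < g.length) (hj : 0 ≤ j)
    (hj2 : j.toNat < (g[i.toNat]'hi2).length) :
    pvGet (pvFlip g P) i j = if P i j then 1 else pvGet g i j := by
  simp only [pvGet, List.getD_eq_getElem?_getD, pvFlip]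
  rw [List.getElem?_mapIdx, List.getElem?_eq_getElem hi2]
  simp only [Option.map_some, Option.getD_some]
  rw [List.getElem?_mapIdx, List.getElem?_eq_getElem hj2]
  simp only [Option.map_some, Option.getD_some, Int.toNat_of_nonneg hi,
    Int.toNat_of_nonneg hj]

theorem pvGet_win {m n : Int} {g : List (List Int)} (hs : pvShape m n g) {p : Int × Int}
    (hw : pvWin m n p) {P : Int → Int → Bool} :
    pvGet (pvFlip g P) p.1 p.2 = if P p.1 p.2 then 1 else pvGet g p.1 p.2 := by
  obtain ⟨hs1, hs2⟩ := hs
  obtain ⟨h1, h2, h3, h4⟩ := hw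
  have hi2 : p.1.toNat < g.length := by omega
  have hj2 : p.2.toNat < (g[p.1.toNat]'hi2).length := by
    have := hs2 _ (List.getElem_mem hi2)
    omega
  rw [pvGet_flip h1 hi2 h3 hj2]

theorem pvFlip_congr {g : List (List Int)} {P Q : Int → Int → Bool}
    (h : ∀ i j, P i j = Q i j) : pvFlip g P = pvFlip g Q := by
  have : P = Q := funext fun i => funext fun j => h i j
  rw [this]

theorem pvFlip_flip (g : List (List Int)) (P Q : Int → Int → Bool) :
    pvFlip (pvFlip g P) Q = pvFlip g (fun i j => P i j || Q i j) := by
  apply List.ext_getElem (by simp [pvFlip])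
  intro k h1 h2
  have hk : k < g.length := by simpa [pvFlip] using h2
  simp only [pvFlip, List.getElem_mapIdx]
  apply List.ext_getElem (by simp)
  intro b hb1 hb2
  simp only [List.getElem_mapIdx]
  by_cases hP : P (k : Int) (b : Int) = true <;> by_cases hQ : Q (k : Int) (b : Int) = true <;>
    simp [hP, hQ]

theorem pvSet_eq_flip {m n : Int} {g : List (List Int)} (hs : pvShape m n g) {p : Int × Int}
    (hw : pvWin m n p) :
    pvSet g p.1 p.2 1 = pvFlip g (fun a b => a == p.1 && b == p.2) := by
  obtain ⟨hs1, hs2⟩ := hs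
  obtain ⟨h1, h2, h3, h4⟩ := hw
  have hi2 : p.1.toNat < g.length := by omega
  have hcast : (p.1.toNat : Int) = p.1 := Int.toNat_of_nonneg h1
  apply List.ext_getElem (by simp [pvSet, pvFlip])
  intro k hk1 hk2
  have hk : k < g.length := by simpa [pvSet] using hk1
  simp only [pvSet, pvFlip, List.getElem_mapIdx]
  rw [List.getElem_modify]
  by_cases hki : p.1.toNat = k
  · subst hki
    rw [if_pos rfl]
    have hjlen : p.2.toNat < (g[p.1.toNat]'hk).length := by
      have := hs2 _ (List.getElem_mem hk)
      omega
    apply List.ext_getElem (by simp)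
    intro b hb1 hb2
    by_cases hbj : p.2.toNat = b
    · subst hbj
      have hb : (((p.1.toNat : Int) == p.1) && ((p.2.toNat : Int) == p.2)) = true := by
        simp [hcast, Int.toNat_of_nonneg h3]
      rw [List.getElem_set, List.getElem_mapIdx, if_pos rfl, if_pos hb]
    · have hne : ¬ ((((p.1.toNat : Int) == p.1) && ((b : Int) == p.2)) = true) := by
        simp only [Bool.and_eq_true, beq_iff_eq]
        rintro ⟨-, hb⟩
        omega
      rw [List.getElem_set, List.getElem_mapIdx, if_neg hbj, if_neg hne]
  · rw [if_neg hki]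
    apply List.ext_getElem (by simp)
    intro b hb1 hb2
    simp only [List.getElem_mapIdx]
    rw [if_neg]
    simp only [Bool.and_eq_true, beq_iff_eq]
    rintro ⟨hk', -⟩
    omega

def pvMem (acc : List (Int × Int)) : Int → Int → Bool := fun i j => decide ((i, j) ∈ acc)

theorem pvSet_flip_mem {m n : Int} {g : List (List Int)} (hs : pvShape m n g)
    {p : Int × Int} (hw : pvWin m n p) (acc : List (Int × Int)) :
    pvSet (pvFlip g (pvMem acc)) p.1 p.2 1 = pvFlip g (pvMem (acc ++ [p])) := by
  rw [pvSet_eq_flip (pvFlip_shape _ hs) hw, pvFlip_flip]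
  apply pvFlip_congr
  intro i j
  by_cases h1 : i = p.1 <;> by_cases h2 : j = p.2 <;>
    simp [pvMem, h1, h2, Prod.ext_iff]

-- the dir fold of A, from a partially flipped state
theorem pvDirFold {m n : Int} {g : List (List Int)} (hs : pvShape m n g) (q : Int × Int) :
    ∀ (ds acc : List (Int × Int)),
      (∀ p ∈ acc, pvWin m n p ∧ pvGet g p.1 p.2 = 0) →
      ∃ acc', (ds.foldl (fun st d =>
          let ni := q.1 + d.1
          let nj := q.2 + d.2
          if 0 ≤ ni ∧ ni < m ∧ 0 ≤ nj ∧ nj < n ∧ pvGet st.1 ni nj = 0 then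
            (pvSet st.1 ni nj 1, st.2 ++ [(ni, nj)])
          else st) (pvFlip g (pvMem acc), acc)) = (pvFlip g (pvMem acc'), acc') ∧
        (∀ p, p ∈ acc' ↔ p ∈ acc ∨ (pvWin m n p ∧ pvGet g p.1 p.2 = 0 ∧
          ∃ d ∈ ds, p = (q.1 + d.1, q.2 + d.2))) ∧
        (∀ p ∈ acc', pvWin m n p ∧ pvGet g p.1 p.2 = 0) := by
  intro ds
  induction ds with
  | nil => exact fun acc hacc => ⟨acc, rfl, by simp, hacc⟩
  | cons d ds ih =>
    intro acc hacc
    simp only [List.foldl_cons]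
    by_cases hC : pvWin m n (q.1 + d.1, q.2 + d.2) ∧ (q.1 + d.1, q.2 + d.2) ∉ acc ∧
        pvGet g (q.1 + d.1) (q.2 + d.2) = 0
    · obtain ⟨hw, hnm, h0⟩ := hC
      obtain ⟨w1, w2, w3, w4⟩ := hw
      have hget : pvGet (pvFlip g (pvMem acc)) (q.1 + d.1) (q.2 + d.2) = 0 := by
        rw [pvGet_win hs (p := (q.1 + d.1, q.2 + d.2)) ⟨w1, w2, w3, w4⟩, if_neg]
        · exact h0
        · simp [pvMem, hnm]
      rw [if_pos ⟨w1, w2, w3, w4, hget⟩]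
      have hset : pvSet (pvFlip g (pvMem acc)) (q.1 + d.1) (q.2 + d.2) 1 =
          pvFlip g (pvMem (acc ++ [(q.1 + d.1, q.2 + d.2)])) :=
        pvSet_flip_mem hs (p := (q.1 + d.1, q.2 + d.2)) ⟨w1, w2, w3, w4⟩ acc
      have hacc' : ∀ p ∈ acc ++ [(q.1 + d.1, q.2 + d.2)], pvWin m n p ∧ pvGet g p.1 p.2 = 0 := by
        intro p hp
        rcases List.mem_append.mp hp with h | h
        · exact hacc p h
        · rw [List.mem_singleton] at h
          subst h
          exact ⟨⟨w1, w2, w3, w4⟩, h0⟩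
      obtain ⟨acc', h1, h2, h3⟩ := ih (acc ++ [(q.1 + d.1, q.2 + d.2)]) hacc'
      refine ⟨acc', by rw [hset]; exact h1, ?_, h3⟩
      intro p
      rw [h2 p]
      constructor
      · rintro (hpa | ⟨hw', h0', d', hd', he'⟩)
        · rcases List.mem_append.mp hpa with h | h
          · exact Or.inl h
          · rw [List.mem_singleton] at h
            subst h
            exact Or.inr ⟨⟨w1, w2, w3, w4⟩, h0, d, List.mem_cons_self, rfl⟩
        · exact Or.inr ⟨hw', h0', d', List.mem_cons_of_mem d hd', he'⟩
      · rintro (hpa | ⟨hw', h0', d', hd', he'⟩)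
        · exact Or.inl (List.mem_append.mpr (Or.inl hpa))
        · rcases List.mem_cons.mp hd' with rfl | hd''
          · exact Or.inl (List.mem_append.mpr (Or.inr (by simp [he'])))
          · exact Or.inr ⟨hw', h0', d', hd'', he'⟩
    · have hcond : ¬ (0 ≤ q.1 + d.1 ∧ q.1 + d.1 < m ∧ 0 ≤ q.2 + d.2 ∧ q.2 + d.2 < n ∧
          pvGet (pvFlip g (pvMem acc)) (q.1 + d.1) (q.2 + d.2) = 0) := by
        rintro ⟨w1, w2, w3, w4, hget⟩
        rw [pvGet_win hs (p := (q.1 + d.1, q.2 + d.2)) ⟨w1, w2, w3, w4⟩] at hget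
        by_cases hm : pvMem acc (q.1 + d.1) (q.2 + d.2) = true
        · rw [if_pos hm] at hget
          exact one_ne_zero hget
        · rw [if_neg hm] at hget
          exact hC ⟨⟨w1, w2, w3, w4⟩, by simpa [pvMem] using hm, hget⟩
      rw [if_neg hcond]
      obtain ⟨acc', h1, h2, h3⟩ := ih acc hacc
      refine ⟨acc', h1, ?_, h3⟩
      intro p
      rw [h2 p]
      constructor
      · rintro (hpa | ⟨hw', h0', d', hd', he'⟩)
        · exact Or.inl hpa
        · exact Or.inr ⟨hw', h0', d', List.mem_cons_of_mem d hd', he'⟩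
      · rintro (hpa | ⟨hw', h0', d', hd', he'⟩)
        · exact Or.inl hpa
        · rcases List.mem_cons.mp hd' with rfl | hd''
          · subst he'
            by_cases hin : (q.1 + d'.1, q.2 + d'.2) ∈ acc
            · exact Or.inl hin
            · exact absurd ⟨hw', hin, h0'⟩ hC
          · exact Or.inr ⟨hw', h0', d', hd'', he'⟩

theorem pvStepDirs_spec {m n : Int} {g : List (List Int)} (hs : pvShape m n g)
    (q : Int × Int) (acc : List (Int × Int))
    (hacc : ∀ p ∈ acc, pvWin m n p ∧ pvGet g p.1 p.2 = 0) :
    ∃ acc', pvStepDirs m n q.1 q.2 (pvFlip g (pvMem acc), acc) = (pvFlip g (pvMem acc'), acc') ∧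
      (∀ p, p ∈ acc' ↔ p ∈ acc ∨ (pvWin m n p ∧ pvGet g p.1 p.2 = 0 ∧ pvAdj q p)) ∧
      (∀ p ∈ acc', pvWin m n p ∧ pvGet g p.1 p.2 = 0) := by
  obtain ⟨acc', h1, h2, h3⟩ := pvDirFold hs q pvDirs acc hacc
  exact ⟨acc', h1, fun p => (h2 p), h3⟩

-- the queue fold of A, from a partially flipped state
theorem pvQFold {m n : Int} {g : List (List Int)} (hs : pvShape m n g) :
    ∀ (Q acc : List (Int × Int)),
      (∀ q ∈ Q, pvWin m n q ∧ pvGet g q.1 q.2 = 1) →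
      (∀ p ∈ acc, pvWin m n p ∧ pvGet g p.1 p.2 = 0) →
      ∃ acc', (Q.foldl (fun st q => if pvGet st.1 q.1 q.2 = 1 then pvStepDirs m n q.1 q.2 st else st)
          (pvFlip g (pvMem acc), acc)) = (pvFlip g (pvMem acc'), acc') ∧
        (∀ p, p ∈ acc' ↔ p ∈ acc ∨ (pvWin m n p ∧ pvGet g p.1 p.2 = 0 ∧ ∃ q ∈ Q, pvAdj q p)) ∧
        (∀ p ∈ acc', pvWin m n p ∧ pvGet g p.1 p.2 = 0) := by
  intro Q
  induction Q with
  | nil => exact fun acc _ hacc => ⟨acc, rfl, by simp, hacc⟩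
  | cons q Q ih =>
    intro acc hQ hacc
    obtain ⟨hqw, hq1⟩ := hQ q List.mem_cons_self
    have hget : pvGet (pvFlip g (pvMem acc)) q.1 q.2 = 1 := by
      rw [pvGet_win hs hqw]
      split
      · rfl
      · exact hq1
    simp only [List.foldl_cons, hget, if_pos]
    obtain ⟨acc2, h1, h2, h3⟩ := pvStepDirs_spec hs q acc hacc
    rw [h1]
    obtain ⟨acc', h1', h2', h3'⟩ := ih acc2 (fun q hq => hQ q (List.mem_cons_of_mem _ hq)) h3
    refine ⟨acc', h1', ?_, h3'⟩
    intro p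
    rw [h2' p]
    constructor
    · rintro (hp2 | ⟨hw', h0', q', hq', ha'⟩)
      · rcases (h2 p).mp hp2 with hpa | ⟨hw', h0', ha'⟩
        · exact Or.inl hpa
        · exact Or.inr ⟨hw', h0', q, List.mem_cons_self, ha'⟩
      · exact Or.inr ⟨hw', h0', q', List.mem_cons_of_mem _ hq', ha'⟩
    · rintro (hpa | ⟨hw', h0', q', hq', ha'⟩)
      · exact Or.inl ((h2 p).mpr (Or.inl hpa))
      · rcases List.mem_cons.mp hq' with rfl | hq''
        · exact Or.inl ((h2 p).mpr (Or.inr ⟨hw', h0', ha'⟩))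
        · exact Or.inr ⟨hw', h0', q', hq'', ha'⟩

theorem pvFlip_memnil (g : List (List Int)) : pvFlip g (pvMem []) = g := by
  apply List.ext_getElem (by simp [pvFlip])
  intro k h1 h2
  simp only [pvFlip, List.getElem_mapIdx]
  apply List.ext_getElem (by simp)
  intro b hb1 hb2
  simp [pvMem]

-- the queue fold of A
theorem pvRound_spec {m n : Int} {g : List (List Int)} (hs : pvShape m n g)
    {Q : List (Int × Int)} (hQ : ∀ q ∈ Q, pvWin m n q ∧ pvGet g q.1 q.2 = 1) :
    ∃ acc', pvRound m n g Q = (pvFlip g (pvMem acc'), acc') ∧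
      (∀ p, p ∈ acc' ↔ pvWin m n p ∧ pvGet g p.1 p.2 = 0 ∧ ∃ q ∈ Q, pvAdj q p) := by
  obtain ⟨acc', h1, h2, h3⟩ := pvQFold hs Q [] hQ (by simp)
  rw [pvFlip_memnil] at h1
  refine ⟨acc', h1, fun p => ?_⟩
  rw [h2 p]
  simp

theorem pvInv_pres {m n : Int} {g : List (List Int)} (hs : pvShape m n g)
    {acc : List (Int × Int)} (hacc : ∀ p, p ∈ acc ↔ pvT m n g p) :
    pvInv m n (pvFlip g (pvMem acc)) acc := by
  constructor
  · intro q hq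
    obtain ⟨hw, h0, -⟩ := (hacc q).mp hq
    refine ⟨hw, ?_⟩
    rw [pvGet_win hs hw, if_pos (by simpa [pvMem] using hq)]
  · rintro p ⟨hw, h0, q, hqw, hq1, hadj⟩
    rw [pvGet_win hs hw] at h0
    have hpnm : ¬ pvMem acc p.1 p.2 = true := by
      intro hm
      rw [if_pos hm] at h0
      exact one_ne_zero h0
    rw [if_neg hpnm] at h0
    rw [pvGet_win hs hqw] at hq1
    by_cases hqm : pvMem acc q.1 q.2 = true
    · exact ⟨q, by simpa [pvMem] using hqm, hadj⟩
    · rw [if_neg hqm] at hq1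
      have : p ∈ acc := (hacc p).mpr ⟨hw, h0, q, hqw, hq1, hadj⟩
      exact absurd (by simpa [pvMem] using this) hpnm

-- B's neighbor test hits exactly the window 1-cells adjacent to p
theorem pvNearZ_spec {m n : Int} {g : List (List Int)} {Z : PySem.Set (Int × Int)}
    (hZ : ∀ p, p ∈ Z ↔ pvWin m n p ∧ pvGet g p.1 p.2 = 1) (p : Int × Int) :
    pvNearZ Z p = true ↔ ∃ q, pvWin m n q ∧ pvGet g q.1 q.2 = 1 ∧ pvAdj q p := by
  simp only [pvNearZ, Bool.or_eq_true, PySem.Set.contains_iff, hZ]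
  constructor
  · rintro (((⟨hw, h1⟩ | ⟨hw, h1⟩) | ⟨hw, h1⟩) | ⟨hw, h1⟩)
    · exact ⟨(p.1 + 1, p.2), hw, h1, (-1, 0), by simp [pvDirs],
        by rw [Prod.ext_iff]; constructor <;> simp⟩
    · exact ⟨(p.1 - 1, p.2), hw, h1, (1, 0), by simp [pvDirs],
        by rw [Prod.ext_iff]; constructor <;> simp⟩
    · exact ⟨(p.1, p.2 + 1), hw, h1, (0, -1), by simp [pvDirs],
        by rw [Prod.ext_iff]; constructor <;> simp⟩
    · exact ⟨(p.1, p.2 - 1), hw, h1, (0, 1), by simp [pvDirs],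
        by rw [Prod.ext_iff]; constructor <;> simp⟩
  · rintro ⟨q, hw, h1, d, hd, he⟩
    have hq : q = (p.1 - d.1, p.2 - d.2) := by
      rw [Prod.ext_iff] at he ⊢
      constructor <;> omega
    subst hq
    fin_cases hd
    · exact Or.inl (Or.inl (Or.inr ⟨by simpa using hw, by simpa using h1⟩))
    · exact Or.inl (Or.inl (Or.inl ⟨by simpa using hw, by simpa using h1⟩))
    · exact Or.inr ⟨by simpa using hw, by simpa using h1⟩
    · exact Or.inl (Or.inr ⟨by simpa using hw, by simpa using h1⟩)

-- the round-for-round bisimulation: A's queue loop = B's set loop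
theorem pvBisim (m n : Int) : ∀ (f : Nat) (g : List (List Int)) (Q : List (Int × Int))
    (Z : PySem.Set (Int × Int)) (E : List (Int × Int)) (c : Int),
    pvShape m n g → pvInv m n g Q → pvSB m n g Z E → Q ≠ [] →
    pvLoopA m n f g Q c = pvSpread f Z E c := by
  intro f
  induction f with
  | zero => intro g Q Z E c _ _ _ _; rfl
  | succ f ih =>
    intro g Q Z E c hs hinv hsb hQ
    obtain ⟨hinv1, hinv2⟩ := hinv
    obtain ⟨hZ, hE⟩ := hsb
    obtain ⟨acc', h1, h2⟩ := pvRound_spec hs hinv1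
    have hiT : ∀ p, p ∈ acc' ↔ pvT m n g p := by
      intro p
      rw [h2 p]
      constructor
      · rintro ⟨hw, h0, q, hq, hadj⟩
        obtain ⟨hqw, hq1⟩ := hinv1 q hq
        exact ⟨hw, h0, q, hqw, hq1, hadj⟩
      · rintro ⟨hw, h0, q, hqw, hq1, hadj⟩
        obtain ⟨q', hq', hadj'⟩ := hinv2 p ⟨hw, h0, q, hqw, hq1, hadj⟩
        exact ⟨hw, h0, q', hq', hadj'⟩
    have hInf : ∀ p, p ∈ E.filter (fun p => pvNearZ Z p) ↔ pvT m n g p := by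
      intro p
      rw [List.mem_filter, hE p, pvNearZ_spec hZ p]
      unfold pvT
      tauto
    have hAstep : pvLoopA m n (f + 1) g Q c = pvLoopA m n f (pvFlip g (pvMem acc')) acc' (c + 1) := by
      rw [pvLoopA, if_neg hQ, h1]
    by_cases hempty : E.filter (fun p => pvNearZ Z p) = []
    · have hacc' : acc' = [] := by
        rw [List.eq_nil_iff_forall_not_mem]
        intro p hp
        exact (List.eq_nil_iff_forall_not_mem.mp hempty) p ((hInf p).mpr ((hiT p).mp hp))
      have : pvLoopA m n f (pvFlip g (pvMem acc')) acc' (c + 1) = c + 1 := by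
        rw [hacc']
        cases f <;> simp [pvLoopA]
      rw [hAstep, this, pvSpread, if_pos hempty]
    · have haccne : acc' ≠ [] := by
        intro hnil
        apply hempty
        rw [List.eq_nil_iff_forall_not_mem]
        intro p hp
        exact (List.eq_nil_iff_forall_not_mem.mp hnil) p ((hiT p).mpr ((hInf p).mp hp))
      rw [hAstep, pvSpread, if_neg hempty]
      set I := E.filter (fun p => pvNearZ Z p) with hI
      set Z' := PySem.Set.update Z I with hZ'
      have hZ'mem : ∀ p, p ∈ Z' ↔ pvWin m n p ∧ pvGet (pvFlip g (pvMem acc')) p.1 p.2 = 1 := by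
        intro p
        rw [hZ', PySem.Set.mem_update, hZ p, hInf p]
        constructor
        · rintro (⟨hw, h1'⟩ | hT)
          · refine ⟨hw, ?_⟩
            rw [pvGet_win hs hw]
            split
            · rfl
            · exact h1'
          · obtain ⟨hw, h0, -⟩ := id hT
            refine ⟨hw, ?_⟩
            rw [pvGet_win hs hw, if_pos (by simp [pvMem]; exact (hiT p).mpr hT)]
        · rintro ⟨hw, h1'⟩
          rw [pvGet_win hs hw] at h1'
          by_cases hm : pvMem acc' p.1 p.2 = true
          · exact Or.inr ((hiT p).mp (by simpa [pvMem] using hm))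
          · rw [if_neg hm] at h1'
            exact Or.inl ⟨hw, h1'⟩
      have hciff : ∀ p, ((!PySem.Set.contains Z' p) = true) ↔ p ∉ Z' := by
        intro p
        simp
      have hE'mem : ∀ p, p ∈ E.filter (fun p => !(PySem.Set.contains Z' p)) ↔
          pvWin m n p ∧ pvGet (pvFlip g (pvMem acc')) p.1 p.2 = 0 := by
        intro p
        rw [List.mem_filter, hE p, hciff p]
        constructor
        · rintro ⟨⟨hw, h0⟩, hnc⟩
          refine ⟨hw, ?_⟩
          rw [pvGet_win hs hw, if_neg]
          · exact h0
          · intro hm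
            exact hnc ((hZ'mem p).mpr ⟨hw, by rw [pvGet_win hs hw, if_pos hm]⟩)
        · rintro ⟨hw, h0⟩
          rw [pvGet_win hs hw] at h0
          by_cases hm : pvMem acc' p.1 p.2 = true
          · rw [if_pos hm] at h0
            exact absurd h0 one_ne_zero
          · rw [if_neg hm] at h0
            refine ⟨⟨hw, h0⟩, fun hpz => ?_⟩
            obtain ⟨hw', h1'⟩ := (hZ'mem p).mp hpz
            rw [pvGet_win hs hw', if_neg hm] at h1'
            omega
      exact ih (pvFlip g (pvMem acc')) acc' Z' _ (c + 1) (pvFlip_shape _ hs)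
        (pvInv_pres hs hiT) ⟨hZ'mem, hE'mem⟩ haccne

-- ===== VERDICT (by name: the statement is the Claim_ definition above) =====
theorem zombieSolutions_spec : Claim_equal_zombieSolutions := by
  unfold Claim_equal_zombieSolutions
  intro grid _ hpre
  unfold Spec_zombieSolutions zombieSolutions zombieSolutions_alt
  by_cases hnil : grid.length ≤ 0
  · rw [if_pos hnil, if_pos hnil]
  · rw [if_neg hnil, if_neg hnil]
    have hne : grid ≠ [] := by
      intro h
      subst h
      simp at hnil
    simp only [ne_eq, hne, not_false_eq_true, if_true]
    set m : Int := (grid.length : Int) with hm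
    set n : Int := ((grid.headD []).length : Int) with hn
    have hmt : m.toNat = grid.length := by omega
    have hnt : n.toNat = (grid.headD []).length := by omega
    have hshape : pvShape m n grid := by
      refine ⟨rfl, fun row hrow => ?_⟩
      have := hpre row hrow
      omega
    set Q0 : List (Int × Int) := (List.range grid.length).flatMap (fun (i : Nat) =>
      (List.range n.toNat).filterMap (fun (j : Nat) =>
        if pvGet grid (i : Int) (j : Int) = 1 then some ((i : Int), (j : Int)) else none))
      with hQ0def
    have hscan : ∀ (v : Int) (p : Int × Int),
        (p ∈ (List.range grid.length).flatMap (fun (i : Nat) =>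
          (List.range ((grid.headD []).length)).filterMap (fun (j : Nat) =>
            if pvCell grid i j = v then some ((i : Int), (j : Int)) else none)))
        ↔ pvWin m n p ∧ pvGet grid p.1 p.2 = v := by
      intro v p
      simp only [List.mem_flatMap, List.mem_filterMap, List.mem_range]
      constructor
      · rintro ⟨i, hi, j, hj, hsome⟩
        by_cases h1 : pvCell grid i j = v
        · rw [if_pos h1] at hsome
          cases hsome
          refine ⟨⟨by omega, by omega, by omega, by omega⟩, ?_⟩
          simpa [pvCell, pvGet] using h1
        · rw [if_neg h1] at hsome
          cases hsome
      · rintro ⟨⟨w1, w2, w3, w4⟩, h1⟩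
        refine ⟨p.1.toNat, by omega, p.2.toNat, by omega, ?_⟩
        have hc : pvCell grid p.1.toNat p.2.toNat = v := by
          simpa [pvCell, pvGet] using h1
        rw [if_pos hc]
        rw [Int.toNat_of_nonneg w1, Int.toNat_of_nonneg w3]
    have hQ0 : ∀ p, p ∈ Q0 ↔ pvWin m n p ∧ pvGet grid p.1 p.2 = 1 := by
      intro p
      rw [hQ0def]
      rw [hnt]
      have := hscan 1 p
      rw [← this]
      simp only [List.mem_flatMap, List.mem_filterMap, List.mem_range]
      constructor <;> rintro ⟨i, hi, j, hj, hsome⟩ <;>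
        exact ⟨i, hi, j, hj, by simpa [pvCell, pvGet] using hsome⟩
    have hZ0 : ∀ p, p ∈ PySem.Set.ofList ((List.range grid.length).flatMap (fun (i : Nat) =>
        (List.range ((grid.headD []).length)).filterMap (fun (j : Nat) =>
          if pvCell grid i j = 1 then some ((i : Int), (j : Int)) else none)))
        ↔ pvWin m n p ∧ pvGet grid p.1 p.2 = 1 := by
      intro p
      rw [PySem.Set.mem_ofList]
      exact hscan 1 p
    by_cases hQ : Q0 = []
    · have hznil : PySem.Set.ofList ((List.range grid.length).flatMap (fun (i : Nat) =>
          (List.range ((grid.headD []).length)).filterMap (fun (j : Nat) =>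
            if pvCell grid i j = 1 then some ((i : Int), (j : Int)) else none))) = [] := by
        rw [List.eq_nil_iff_forall_not_mem]
        intro p hp
        have := (hQ0 p).mpr ((hZ0 p).mp hp)
        rw [hQ] at this
        cases this
      rw [hQ, hznil]
      cases h : grid.length * n.toNat + 1 <;> simp [pvLoopA]
    · have hzne : ¬ (PySem.Set.ofList ((List.range grid.length).flatMap (fun (i : Nat) =>
          (List.range ((grid.headD []).length)).filterMap (fun (j : Nat) =>
            if pvCell grid i j = 1 then some ((i : Int), (j : Int)) else none))) = []) := by
        intro hznil
        apply hQ
        rw [List.eq_nil_iff_forall_not_mem]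
        intro p hp
        have := (hZ0 p).mpr ((hQ0 p).mp hp)
        rw [hznil] at this
        cases this
      rw [if_neg hzne]
      have hfuel : grid.length * n.toNat + 1 = grid.length * ((grid.headD []).length) + 1 := by
        rw [hnt]
      rw [hfuel] at *
      apply pvBisim m n _ grid Q0 _ _ 0 hshape ?_ ?_ hQ
      · refine ⟨fun q hq => (hQ0 q).mp hq, ?_⟩
        rintro p ⟨hw', h0', q, hqw, hq1, hadj⟩
        exact ⟨q, (hQ0 q).mpr ⟨hqw, hq1⟩, hadj⟩
      · exact ⟨hZ0, fun p => hscan 0 p⟩
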